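-- pv_equiv track=rewrite | github.com/a11003070312/novelops | scripts/scan-text.py | strip_markdown_header
-- ===== SOURCE A (Python) =====
-- def strip_markdown_header(text: str) -> tuple[str, int]:
--     """移除开头的 Markdown 标题行 (# 开头) 以避免干扰正文检测。
--     返回 (stripped_text, header_line_count) 用于行号偏移修正。"""
--     lines = text.splitlines()
--     content_lines: list[str] = []
--     header_done = False
--     header_line_count = 0
--     for line in lines:
--         stripped = line.strip()
--         if not header_done:
--             if stripped.startswith("#") or stripped == "":
--                 header_line_count += 1
--                 continue
--             header_done = True
--         content_lines.append(line)
--     return "\n".join(content_lines), header_line_count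
-- ===== SOURCE B (Python) =====
-- def strip_markdown_header(text: str) -> tuple[str, int]:
--     """Table-based version: classify every line up front with a boolean table,
--     then locate the first content line via list.index and slice there."""
--     lines = text.splitlines()
--     is_header = [l.strip() == "" or l.strip().startswith("#") for l in lines]
--     n = is_header.index(False) if False in is_header else len(lines)
--     return "\n".join(lines[n:]), n
-- ===== Notes on version B (the rewrite author's own statement) =====
-- stated objective: alternative
-- what changed: Replaces A's stateful flag-plus-append loop with a staged table approach: build a boolean is-header table for all lines with one comprehension, find the first False with list.index (falling back to len), and return one slice-and-join at that index.
import Mathlib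
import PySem

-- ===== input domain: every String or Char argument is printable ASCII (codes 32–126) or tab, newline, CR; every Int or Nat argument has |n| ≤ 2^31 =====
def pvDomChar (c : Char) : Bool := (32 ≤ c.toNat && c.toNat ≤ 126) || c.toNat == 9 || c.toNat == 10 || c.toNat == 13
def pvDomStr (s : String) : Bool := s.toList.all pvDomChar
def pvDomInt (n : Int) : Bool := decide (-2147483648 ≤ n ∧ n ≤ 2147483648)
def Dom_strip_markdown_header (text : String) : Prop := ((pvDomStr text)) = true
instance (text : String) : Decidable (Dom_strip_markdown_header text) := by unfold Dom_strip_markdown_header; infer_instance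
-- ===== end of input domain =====

-- B replaces A's stateful flag-plus-append loop by a staged table approach: classify all lines, list.index the first content line, slice there (objective: alternative).

-- ===== PORT A =====
-- the loop body of A, over state (content_lines, header_done, header_line_count)
def stripHdrStepA (st : List String × Bool × Nat) (line : String) : List String × Bool × Nat :=
  let stripped := PySem.Str.strip line
  if !st.2.1 then
    if PySem.Str.startswith stripped "#" || stripped == "" then
      (st.1, st.2.1, st.2.2 + 1)
    else
      (st.1 ++ [line], true, st.2.2)
  else
    (st.1 ++ [line], st.2.1, st.2.2)

def strip_markdown_header (text : String) : String × Int :=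
  let lines := PySem.Str.splitlines text
  let st := lines.foldl stripHdrStepA ([], false, 0)
  (PySem.Str.join "\n" st.1, (st.2.2 : Int))

-- ===== PORT B =====
-- Source B's per-line classification: l.strip() == "" or l.strip().startswith("#")
def hdrPredB (l : String) : Bool :=
  PySem.Str.strip l == "" || PySem.Str.startswith (PySem.Str.strip l) "#"

def strip_markdown_header_alt (text : String) : String × Int :=
  let lines := PySem.Str.splitlines text
  let is_header := lines.map hdrPredB
  let n : Nat := if false ∈ is_header then (PySem.List.index? is_header false).getD 0 else is_header.length
  (PySem.Str.join "\n" (lines.drop n), (n : Int))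

-- ===== PRECONDITION & SPEC =====
def Spec_strip_markdown_header (text : String) (out : String × Int) : Prop := out = strip_markdown_header_alt text
instance (text : String) (out : String × Int) : Decidable (Spec_strip_markdown_header text out) := by unfold Spec_strip_markdown_header; infer_instance

-- ===== CLAIM (what is proved, stated in full; the proofs are below) =====
def Claim_equal_strip_markdown_header : Prop := ∀ (text : String), Dom_strip_markdown_header text → Spec_strip_markdown_header text (strip_markdown_header text)

-- ===== LEMMAS AND PROOFS =====
-- proof-only helper: length of the maximal leading prefix of header lines
def hdrBoundary : List String → Nat
  | [] => 0
  | l :: rest => if hdrPredB l then hdrBoundary rest + 1 else 0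

-- A's branch condition (as a Prop) is B's predicate
lemma hdrPredB_true_iff (l : String) :
    hdrPredB l = true ↔
      (PySem.Chars.startswith (PySem.Chars.strip l.toList) ['#'] = true ∨ PySem.Str.strip l = "") := by
  simp [hdrPredB, PySem.Str.startswith, PySem.Str.strip, or_comm]

-- once header_done is true, A's loop just appends every remaining line
lemma foldA_done (lines : List String) (acc : List String) (cnt : Nat) :
    lines.foldl stripHdrStepA (acc, true, cnt) = (acc ++ lines, true, cnt) := by
  induction lines generalizing acc with
  | nil => simp
  | cons l rest ih =>
    simp only [List.foldl_cons, stripHdrStepA]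
    simpa using ih (acc ++ [l])

-- A's loop from the not-done state: content is the slice past the boundary, count is the boundary
lemma foldA_notdone (lines : List String) (acc : List String) (cnt : Nat) :
    (lines.foldl stripHdrStepA (acc, false, cnt)).1 = acc ++ lines.drop (hdrBoundary lines) ∧
    (lines.foldl stripHdrStepA (acc, false, cnt)).2.2 = cnt + hdrBoundary lines := by
  induction lines generalizing acc cnt with
  | nil => simp [hdrBoundary]
  | cons l rest ih =>
    rcases ih acc (cnt + 1) with ⟨h1, h2⟩
    by_cases h : hdrPredB l = true
    · have hA := (hdrPredB_true_iff l).mp h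
      simp [stripHdrStepA, hA, h, hdrBoundary, h1, h2]
      omega
    · have hA : ¬(PySem.Chars.startswith (PySem.Chars.strip l.toList) ['#'] = true ∨ PySem.Str.strip l = "") :=
        fun hx => h ((hdrPredB_true_iff l).mpr hx)
      have h0 : hdrPredB l = false := by simpa using h
      simp [stripHdrStepA, hA, h0, hdrBoundary, foldA_done]

-- B's table-and-index computation equals the boundary length
lemma indexB_eq_boundary (lines : List String) :
    (if false ∈ lines.map hdrPredB then (PySem.List.index? (lines.map hdrPredB) false).getD 0
     else (lines.map hdrPredB).length) = hdrBoundary lines := by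
  induction lines with
  | nil => simp [hdrBoundary]
  | cons l rest ih =>
    by_cases h : hdrPredB l = true
    · have hstep := PySem.List.index?_cons_of_ne (x := hdrPredB l) (xs := rest.map hdrPredB)
        (v := false) (by simp [h])
      by_cases hm : false ∈ rest.map hdrPredB
      · rcases Option.isSome_iff_exists.mp ((PySem.List.index?_isSome_iff _ _).mpr hm) with ⟨k, hk⟩
        have hmem : false ∈ (l :: rest).map hdrPredB := by simp [hm]
        rw [if_pos hmem, List.map_cons, hstep, hk]
        simp only [hm, if_pos, hk] at ih
        simp [hdrBoundary, h]
        simpa [hk] using ih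
      · have hmem : ¬ false ∈ (l :: rest).map hdrPredB := by simp [hm, h]
        rw [if_neg hmem]
        simp only [hm, if_neg, not_false_eq_true] at ih
        simp [hdrBoundary, h]
        simpa using ih
    · have h0 : hdrPredB l = false := by simpa using h
      have hc : (l :: rest).map hdrPredB = false :: rest.map hdrPredB := by simp [h0]
      rw [hc, if_pos (by simp), PySem.List.index?_cons_self]
      simp [hdrBoundary, h0]

-- ===== VERDICT (by name: the statement is the Claim_ definition above) =====
theorem strip_markdown_header_spec : Claim_equal_strip_markdown_header := by
  intro text _
  unfold Spec_strip_markdown_header strip_markdown_header strip_markdown_header_alt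
  rcases foldA_notdone (PySem.Str.splitlines text) [] 0 with ⟨h1, h2⟩
  rw [← indexB_eq_boundary (PySem.Str.splitlines text)] at h1 h2
  simp [h1, h2]
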